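-- pv_equiv track=rewrite | github.com/dunkmann00/PrusaPosts | ColorLitho/ColorBlip/litho_blip.py | get_value_for_id
-- ===== SOURCE A (Python) =====
-- PRUSA_CONFIG_ID = "; prusaslicer_config = "
--
-- def get_value_for_id(id, gcode_lines):
--     if isinstance(id, str):
--         id = [id]
--     for gcode_id in id:
--         for line in reversed(gcode_lines): # Go reversed because these things are found at the end
--             if line.startswith(gcode_id):
--                 value = line.split("=")[-1].strip()
--                 if value != "nil":
--                     return value
--             elif line.startswith(PRUSA_CONFIG_ID):
--                 if line.split("=")[-1].strip() == "begin":
--                     break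
-- ===== SOURCE B (Python) =====
-- PRUSA_CONFIG_ID = "; prusaslicer_config = "
--
-- def _tail_val(line):
--     return line.split("=")[-1].strip()
--
-- def _relevant(gcode_id, line):
--     # a line the original scan would stop at: a non-nil prefix match, or a config 'begin' boundary
--     return (line.startswith(gcode_id) and _tail_val(line) != "nil") or \
--            (not line.startswith(gcode_id) and line.startswith(PRUSA_CONFIG_ID)
--             and _tail_val(line) == "begin")
--
-- def get_value_for_id(id, gcode_lines):
--     if isinstance(id, str):
--         id = [id]
--     for gcode_id in id:
--         relevant = [line for line in gcode_lines if _relevant(gcode_id, line)]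
--         if relevant and relevant[-1].startswith(gcode_id):
--             return _tail_val(relevant[-1])
--     return None
-- ===== Notes on version B (the rewrite author's own statement) =====
-- stated objective: alternative
-- what changed: Replaces the stateful reverse scan with break/early-return by a declarative pass per id: filter the 'relevant' lines (non-nil prefix matches and config 'begin' boundaries), then return the value of the last relevant line iff it is a prefix match.
import Mathlib
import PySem

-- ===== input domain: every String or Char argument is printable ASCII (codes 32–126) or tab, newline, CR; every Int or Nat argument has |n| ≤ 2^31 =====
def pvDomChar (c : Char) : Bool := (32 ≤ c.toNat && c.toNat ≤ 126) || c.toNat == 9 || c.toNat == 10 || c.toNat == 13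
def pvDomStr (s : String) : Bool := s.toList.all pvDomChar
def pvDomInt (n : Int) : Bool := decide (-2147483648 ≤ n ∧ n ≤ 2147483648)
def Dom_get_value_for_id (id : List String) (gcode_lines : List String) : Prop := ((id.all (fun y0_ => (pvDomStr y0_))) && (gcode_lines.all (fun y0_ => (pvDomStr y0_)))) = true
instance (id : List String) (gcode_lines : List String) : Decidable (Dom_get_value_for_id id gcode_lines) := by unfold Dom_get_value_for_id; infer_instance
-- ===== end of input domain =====

-- B replaces A's stateful reverse scan with break/early-return by a declarative per-id pass:
-- filter the relevant lines and inspect only the last one (objective: alternative).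

def PRUSA_CONFIG_ID : String := "; prusaslicer_config = "

-- line.split("=")[-1].strip()  (sep "=" is nonempty so split? = some, and the result list is nonempty, so [-1] = last)
def lastEqVal (line : String) : String :=
  PySem.Str.strip (((PySem.Str.split? line "=").getD []).getLastD "")

-- ===== PORT A =====
-- inner 'for line in reversed(gcode_lines)' loop: some v = early return; none = loop ended or break
def getValueLoopA (gcode_id : String) : List String → Option String
  | [] => none
  | line :: rest =>
    if PySem.Str.startswith line gcode_id then
      let value := lastEqVal line
      if value ≠ "nil" then some value else getValueLoopA gcode_id rest
    else if PySem.Str.startswith line PRUSA_CONFIG_ID then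
      if lastEqVal line = "begin" then none else getValueLoopA gcode_id rest
    else getValueLoopA gcode_id rest

def get_value_for_id (id : List String) (gcode_lines : List String) : Option String :=
  match id with
  | [] => none
  | gcode_id :: rest =>
    match getValueLoopA gcode_id gcode_lines.reverse with
    | some v => some v
    | none => get_value_for_id rest gcode_lines

-- ===== PORT B =====
-- a line the original scan would stop at: a non-nil prefix match, or a config 'begin' boundary
def relevantB (gcode_id line : String) : Bool :=
  (PySem.Str.startswith line gcode_id && !(lastEqVal line == "nil"))
  || (!PySem.Str.startswith line gcode_id && PySem.Str.startswith line PRUSA_CONFIG_ID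
      && (lastEqVal line == "begin"))

def get_value_for_id_alt (id : List String) (gcode_lines : List String) : Option String :=
  match id with
  | [] => none
  | gcode_id :: rest =>
    let relevant := gcode_lines.filter (relevantB gcode_id)
    match relevant.getLast? with
    | some last =>
      if PySem.Str.startswith last gcode_id then some (lastEqVal last)
      else get_value_for_id_alt rest gcode_lines
    | none => get_value_for_id_alt rest gcode_lines

-- ===== PRECONDITION & SPEC =====
def Spec_get_value_for_id (id : List String) (gcode_lines : List String) (out : Option String) : Prop := out = get_value_for_id_alt id gcode_lines
instance (id : List String) (gcode_lines : List String) (out : Option String) : Decidable (Spec_get_value_for_id id gcode_lines out) := by unfold Spec_get_value_for_id; infer_instance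

-- ===== CLAIM (what is proved, stated in full; the proofs are below) =====
def Claim_equal_get_value_for_id : Prop := ∀ (id : List String) (gcode_lines : List String), Dom_get_value_for_id id gcode_lines → Spec_get_value_for_id id gcode_lines (get_value_for_id id gcode_lines)

-- ===== LEMMAS AND PROOFS =====

theorem pvBindSome {A B : Type} (a : A) (f : A -> Option B) : (some a).bind f = f a := rfl

-- A's reverse scan stops at the last relevant line (if any) and returns its value iff it is a match.
theorem loopA_eq_filter_last (gid : String) (l : List String) :
    getValueLoopA gid l.reverse =
      ((l.filter (relevantB gid)).getLast?.bind fun last =>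
        if PySem.Str.startswith last gid then some (lastEqVal last) else none) := by
  induction l using List.reverseRecOn with
  | nil => rfl
  | append_singleton l x ih =>
    rw [List.reverse_append, List.reverse_singleton, List.singleton_append,
        List.filter_append, getValueLoopA]
    by_cases hs : PySem.Str.startswith x gid = true
    · by_cases hn : lastEqVal x = "nil"
      · have hrel : relevantB gid x = false := by
          unfold relevantB; rw [hs, hn]; simp
        have hfx : List.filter (relevantB gid) [x] = [] := by simp [hrel]
        rw [hfx, List.append_nil, if_pos hs, if_neg (not_not_intro hn)]
        exact ih
      · have hrel : relevantB gid x = true := by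
          unfold relevantB; rw [hs]; simp [hn]
        have hfx : List.filter (relevantB gid) [x] = [x] := by simp [hrel]
        rw [hfx, List.getLast?_concat, pvBindSome, if_pos hs, if_pos hn, if_pos hs]
    · rw [Bool.not_eq_true] at hs
      by_cases hc : PySem.Str.startswith x PRUSA_CONFIG_ID = true
      · by_cases hb : lastEqVal x = "begin"
        · have hrel : relevantB gid x = true := by
            unfold relevantB; rw [hs, hc, hb]; simp
          have hfx : List.filter (relevantB gid) [x] = [x] := by simp [hrel]
          rw [hfx, List.getLast?_concat, pvBindSome,
              if_neg (by rw [hs]; simp), if_pos hc, if_pos hb,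
              if_neg (by rw [hs]; simp)]
        · have hrel : relevantB gid x = false := by
            unfold relevantB; rw [hs, hc]; simp [hb]
          have hfx : List.filter (relevantB gid) [x] = [] := by simp [hrel]
          rw [hfx, List.append_nil, if_neg (by rw [hs]; simp), if_pos hc, if_neg hb]
          exact ih
      · rw [Bool.not_eq_true] at hc
        have hrel : relevantB gid x = false := by
          unfold relevantB; rw [hs, hc]; simp
        have hfx : List.filter (relevantB gid) [x] = [] := by simp [hrel]
        rw [hfx, List.append_nil, if_neg (by rw [hs]; simp), if_neg (by rw [hc]; simp)]
        exact ih

theorem get_value_for_id_eq (id : List String) (gcode_lines : List String) :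
    get_value_for_id id gcode_lines = get_value_for_id_alt id gcode_lines := by
  induction id with
  | nil => rfl
  | cons gcode_id rest ih =>
    rw [get_value_for_id, get_value_for_id_alt, loopA_eq_filter_last]
    cases h : (gcode_lines.filter (relevantB gcode_id)).getLast? with
    | none => simpa using ih
    | some last =>
      rw [pvBindSome]
      by_cases hs : PySem.Str.startswith last gcode_id = true
      · rw [if_pos hs]
        show some (lastEqVal last) =
          if PySem.Str.startswith last gcode_id = true then some (lastEqVal last)
          else get_value_for_id_alt rest gcode_lines
        rw [if_pos hs]
      · rw [if_neg hs]
        show get_value_for_id rest gcode_lines =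
          if PySem.Str.startswith last gcode_id = true then some (lastEqVal last)
          else get_value_for_id_alt rest gcode_lines
        rw [if_neg hs]
        exact ih

-- ===== VERDICT (by name: the statement is the Claim_ definition above) =====
theorem get_value_for_id_spec : Claim_equal_get_value_for_id := by
  intro id gcode_lines _
  unfold Spec_get_value_for_id
  exact get_value_for_id_eq id gcode_lines
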